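-- pv_equiv track=rewrite | github.com/kkw2758/Programmers | Algorithm/구현/LEVEL1/둘만의 암호.py | solution
-- ===== SOURCE A (Python) =====
-- def solution(s, skip, index):
--     answer = ''
--     for c in s:
--         skip_count = 0
--         for i in range(1, index + 1):
--             if chr((ord(c) + i - 97) % 26 + 97) in skip:
--                 skip_count += 1
--         answer += chr((ord(c) + index + skip_count - 97) % 26 + 97)
--     return answer
-- ===== SOURCE B (Python) =====
-- def solution(s, skip, index):
--     # set of skip letters as residues 0..25 (only lowercase letters can ever match)
--     S = sorted({ord(ch) - 97 for ch in skip if 97 <= ord(ch) <= 122})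
--     if index > 0:
--         q, r = divmod(index, 26)
--     else:
--         q, r = 0, 0
--     # W[t] = skipped-letter count for any char c with ord(c) % 26 == t:
--     # q full cycles over all of S plus the partial window of length r
--     W = [q * len(S) + sum(1 for j in S if (j + 96 - t) % 26 < r) for t in range(26)]
--     return ''.join(chr((ord(c) + index + W[ord(c) % 26] - 97) % 26 + 97) for c in s)
-- ===== Notes on version B (the rewrite author's own statement) =====
-- stated objective: faster
-- what changed: A counts skipped letters with a fresh inner loop over range(1, index+1) (substring test against skip each step) for every character; B precomputes the skip-letter residue set once and, per residue class, gets the count in closed form as full-26-cycle count (index//26 * |set|) plus a mod-26 window membership count, looked up from a 26-entry table.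
import Mathlib
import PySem

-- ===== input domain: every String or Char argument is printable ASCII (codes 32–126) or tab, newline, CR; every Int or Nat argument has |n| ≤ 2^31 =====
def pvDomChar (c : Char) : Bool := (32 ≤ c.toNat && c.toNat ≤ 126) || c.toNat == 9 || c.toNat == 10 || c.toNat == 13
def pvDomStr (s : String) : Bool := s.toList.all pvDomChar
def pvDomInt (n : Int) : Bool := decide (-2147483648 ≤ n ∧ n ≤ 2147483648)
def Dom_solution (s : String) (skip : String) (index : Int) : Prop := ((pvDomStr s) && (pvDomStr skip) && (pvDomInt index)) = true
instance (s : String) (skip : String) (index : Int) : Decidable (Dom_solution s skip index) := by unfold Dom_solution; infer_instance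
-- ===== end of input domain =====

-- B replaces A's per-character scan of range(1, index+1) by a closed-form count
-- (full 26-cycles times |skip set| plus a mod-26 window), objective: faster.

-- ===== PORT A =====
def solution (s : String) (skip : String) (index : Int) : String :=
  String.ofList ((s.toList).foldl (fun answer c =>
    let skip_count : Int :=
      (PySem.List.pyRange 1 (index + 1) 1).foldl (fun sc i =>
        if PySem.Chars.isIn [Char.ofNat (PySem.Int.mod ((c.toNat : Int) + i - 97) 26 + 97).toNat] skip.toList
        then sc + 1 else sc) 0
    answer ++ [Char.ofNat (PySem.Int.mod ((c.toNat : Int) + index + skip_count - 97) 26 + 97).toNat]) [])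

-- ===== PORT B =====
def solution_alt (s : String) (skip : String) (index : Int) : String :=
  let S : List Int := PySem.List.sorted (PySem.Set.ofList
      (skip.toList.filterMap (fun ch =>
        if 97 ≤ ch.toNat ∧ ch.toNat ≤ 122 then some ((ch.toNat : Int) - 97) else none)))
      (fun x => x) false
  let q : Int := if 0 < index then PySem.Int.floordiv index 26 else 0
  let r : Int := if 0 < index then PySem.Int.mod index 26 else 0
  let W : List Int := (PySem.List.pyRange 0 26 1).map (fun t =>
      q * S.length + ((S.filter (fun j => PySem.Int.mod (j + 96 - t) 26 < r)).length : Int))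
  String.ofList (s.toList.map (fun c =>
    Char.ofNat (PySem.Int.mod ((c.toNat : Int) + index + PySem.List.pyGetD W (PySem.Int.mod (c.toNat : Int) 26) 0 - 97) 26 + 97).toNat))

-- ===== PRECONDITION & SPEC =====
def Spec_solution (s : String) (skip : String) (index : Int) (out : String) : Prop := out = solution_alt s skip index
instance (s : String) (skip : String) (index : Int) (out : String) : Decidable (Spec_solution s skip index out) := by unfold Spec_solution; infer_instance

-- ===== CLAIM (what is proved, stated in full; the proofs are below) =====
def Claim_equal_solution : Prop := ∀ (s : String) (skip : String) (index : Int), Dom_solution s skip index → Spec_solution s skip index (solution s skip index)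

-- ===== LEMMAS AND PROOFS =====

theorem countP_or_disjoint (l : List Nat) (A B : Nat → Bool)
    (h : ∀ v ∈ l, ¬(A v = true ∧ B v = true)) :
    l.countP (fun v => A v || B v) = l.countP A + l.countP B := by
  induction l with
  | nil => simp
  | cons x xs ih =>
    simp only [List.countP_cons]
    rw [ih (fun v hv => h v (List.mem_cons_of_mem _ hv))]
    have := h x (List.mem_cons_self ..)
    cases hA : A x <;> cases hB : B x <;> simp_all <;> omega

theorem countP_range_unique (N v0 : Nat) (p : Nat → Bool) (h : v0 < N) :
    (List.range N).countP (fun v => p v && decide (v = v0)) = if p v0 then 1 else 0 := by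
  induction N with
  | zero => omega
  | succ n ih =>
    rw [List.range_succ, List.countP_append]
    by_cases hv : v0 < n
    · rw [ih hv]
      have : (p n && decide (n = v0)) = false := by
        cases hp : p n <;> simp <;> omega
      simp [this]
    · have hv0 : v0 = n := by omega
      subst hv0
      have : (List.range v0).countP (fun v => p v && decide (v = v0)) = 0 := by
        rw [List.countP_eq_zero]
        intro a ha
        have := List.mem_range.mp ha
        cases hp : p a <;> simp <;> omega
      rw [this]
      cases hp : p v0 <;> simp [hp]

theorem core_count (P : Nat → Bool) (a : Nat) : ∀ n : Nat,
    (List.range n).countP (fun k => P ((a + k) % 26)) =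
    n / 26 * (List.range 26).countP P +
    (List.range 26).countP (fun v => P v && decide ((v + 26 - a % 26) % 26 < n % 26)) := by
  intro n
  induction n with
  | zero =>
    have : (List.range 26).countP (fun v => P v && decide ((v + 26 - a % 26) % 26 < 0 % 26)) = 0 := by
      rw [List.countP_eq_zero]; intro v _; cases hp : P v <;> simp
    simp [this]
  | succ n ih =>
    rw [List.range_succ, List.countP_append]
    rw [ih]
    have hlast : (List.countP (fun k => P ((a + k) % 26)) [n]) = if P ((a + n) % 26) then 1 else 0 := by
      cases hp : P ((a + n) % 26) <;> simp [hp]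
    rw [hlast]
    set v0 := (a + n) % 26 with hv0
    have hv0lt : v0 < 26 := by omega
    by_cases hr : n % 26 < 25
    · have h1 : (n + 1) / 26 = n / 26 := by omega
      have h2 : (n + 1) % 26 = n % 26 + 1 := by omega
      rw [h1, h2]
      have hcongr : (List.range 26).countP (fun v => P v && decide ((v + 26 - a % 26) % 26 < n % 26 + 1)) =
          (List.range 26).countP (fun v => (P v && decide ((v + 26 - a % 26) % 26 < n % 26)) || (P v && decide (v = v0))) := by
        apply List.countP_congr
        intro v hv
        have hvlt : v < 26 := List.mem_range.mp hv
        have key : ((v + 26 - a % 26) % 26 = n % 26) ↔ v = v0 := by rw [hv0]; omega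
        cases hp : P v <;> simp [key] <;> omega
      rw [hcongr, countP_or_disjoint _ _ _ (by
        intro v hv hand
        have hvlt : v < 26 := List.mem_range.mp hv
        obtain ⟨hA, hB⟩ := hand
        have h3 : (v + 26 - a % 26) % 26 < n % 26 := (by simpa using hA : P v = true ∧ _).2
        have h4 : v = v0 := (by simpa using hB : P v = true ∧ _).2
        rw [hv0] at h4; omega)]
      rw [countP_range_unique 26 v0 P hv0lt]
      omega
    · have hr25 : n % 26 = 25 := by omega
      have h1 : (n + 1) / 26 = n / 26 + 1 := by omega
      have h2 : (n + 1) % 26 = 0 := by omega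
      rw [h1, h2]
      have hz : (List.range 26).countP (fun v => P v && decide ((v + 26 - a % 26) % 26 < 0)) = 0 := by
        rw [List.countP_eq_zero]; intro v _; cases hp : P v <;> simp
      rw [hz]
      have hC : (List.range 26).countP P =
          (List.range 26).countP (fun v => (P v && decide ((v + 26 - a % 26) % 26 < n % 26)) || (P v && decide (v = v0))) := by
        apply List.countP_congr
        intro v hv
        have hvlt : v < 26 := List.mem_range.mp hv
        have key : ((v + 26 - a % 26) % 26 = 25) ↔ v = v0 := by rw [hv0]; omega
        cases hp : P v <;> simp [hr25] <;> omega
      rw [hC, countP_or_disjoint _ _ _ (by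
        intro v hv hand
        have hvlt : v < 26 := List.mem_range.mp hv
        obtain ⟨hA, hB⟩ := hand
        have h3 : (v + 26 - a % 26) % 26 < n % 26 := (by simpa using hA : P v = true ∧ _).2
        have h4 : v = v0 := (by simpa using hB : P v = true ∧ _).2
        rw [hv0] at h4; omega)]
      rw [countP_range_unique 26 v0 P hv0lt]
      ring

theorem charToNat_ofNat (n : Nat) (h : n < 55296) : (Char.ofNat n).toNat = n := by
  rw [Char.toNat_ofNat, if_pos (Or.inl h)]

theorem char_toNat_inj (a b : Char) (h : a.toNat = b.toNat) : a = b := by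
  have := Char.ofNat_toNat a
  rw [h, Char.ofNat_toNat b] at this
  exact this.symm

theorem length_filter_eq_countP (S : List Int) (hnd : S.Nodup)
    (hb : ∀ x ∈ S, 0 ≤ x ∧ x < 26) (p : Int → Bool) :
    (S.filter p).length =
    (List.range 26).countP (fun (v : Nat) => decide ((v : Int) ∈ S) && p (v : Int)) := by
  have hperm : (S.filter p).Perm
      (((List.range 26).filter (fun (v : Nat) => decide ((v : Int) ∈ S) && p (v : Int))).map
        (fun v : Nat => (v : Int))) := by
    rw [List.perm_ext_iff_of_nodup (hnd.filter p)
        ((List.nodup_range.filter _).map (fun _ _ h => by exact_mod_cast h))]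
    intro x
    simp only [List.mem_filter, List.mem_map, List.mem_range]
    constructor
    · rintro ⟨hxS, hpx⟩
      obtain ⟨h0, h26⟩ := hb x hxS
      refine ⟨x.toNat, ⟨by omega, ?_⟩, by omega⟩
      have hx : (x.toNat : Int) = x := by omega
      rw [hx]
      simp [hxS, hpx]
    · rintro ⟨v, ⟨hv, hg⟩, hx⟩
      subst hx
      simpa using hg
  rw [hperm.length_eq, List.length_map, List.countP_eq_length_filter]

def Sskip (skip : String) : List Int :=
  PySem.List.sorted (PySem.Set.ofList
      (skip.toList.filterMap (fun ch =>
        if 97 ≤ ch.toNat ∧ ch.toNat ≤ 122 then some ((ch.toNat : Int) - 97) else none)))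
      (fun x => x) false

theorem Sskip_nodup (skip : String) : (Sskip skip).Nodup :=
  (PySem.List.sorted_perm _ _ _).nodup_iff.mpr (PySem.Set.nodup_ofList _)

theorem Sskip_bounds (skip : String) : ∀ x ∈ Sskip skip, 0 ≤ x ∧ x < 26 := by
  intro x hx
  rw [Sskip, PySem.List.mem_sorted, PySem.Set.mem_ofList, List.mem_filterMap] at hx
  obtain ⟨ch, _, hsome⟩ := hx
  split at hsome
  · cases hsome; omega
  · cases hsome

theorem mem_Sskip (skip : String) (v : Nat) (hv : v < 26) :
    (v : Int) ∈ Sskip skip ↔ Char.ofNat (v + 97) ∈ skip.toList := by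
  rw [Sskip, PySem.List.mem_sorted, PySem.Set.mem_ofList, List.mem_filterMap]
  constructor
  · rintro ⟨ch, hch, hsome⟩
    split at hsome
    · rename_i hrange
      have heq : (ch.toNat : Int) - 97 = (v : Int) := Option.some.inj hsome
      have hch97 : ch.toNat = v + 97 := by omega
      have : ch = Char.ofNat (v + 97) := by
        apply char_toNat_inj
        rw [hch97, charToNat_ofNat _ (by omega)]
      rwa [← this]
    · cases hsome
  · intro hmem
    refine ⟨Char.ofNat (v + 97), hmem, ?_⟩
    rw [if_pos (by rw [charToNat_ofNat _ (by omega)]; omega)]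
    rw [charToNat_ofNat _ (by omega)]
    congr 1
    omega

theorem inner_count_eq (skip : String) (index : Int) (c : Char) :
    ((PySem.List.pyRange 1 (index + 1) 1).foldl (fun sc i =>
        if PySem.Chars.isIn [Char.ofNat (PySem.Int.mod ((c.toNat : Int) + i - 97) 26 + 97).toNat] skip.toList
        then sc + 1 else sc) (0 : Int))
    = PySem.List.pyGetD
        ((PySem.List.pyRange 0 26 1).map (fun t =>
          (if 0 < index then PySem.Int.floordiv index 26 else 0) * ((Sskip skip).length : Int) +
          (((Sskip skip).filter (fun j => PySem.Int.mod (j + 96 - t) 26 <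
              (if 0 < index then PySem.Int.mod index 26 else 0))).length : Int)))
        (PySem.Int.mod (c.toNat : Int) 26) 0 := by
  rw [PySem.List.foldl_if_add_one]
  rw [PySem.List.pyGetD_map_pyRange_of_nonneg _ _ _ _
      (PySem.Int.mod_nonneg _ (by norm_num)) (PySem.Int.mod_lt _ (by norm_num))]
  by_cases hpos : 0 < index
  · -- positive index
    set m := c.toNat with hm
    set n := index.toNat with hn
    have hidx : index = (n : Int) := by omega
    have hq : PySem.Int.floordiv index 26 = ((n / 26 : Nat) : Int) := by
      rw [hidx]; exact_mod_cast PySem.Int.floordiv_natCast n 26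
    have hr : PySem.Int.mod index 26 = ((n % 26 : Nat) : Int) := by
      rw [hidx]; exact_mod_cast PySem.Int.mod_natCast n 26
    have htI : PySem.Int.mod (m : Int) 26 = ((m % 26 : Nat) : Int) := by
      exact_mod_cast PySem.Int.mod_natCast m 26
    rw [if_pos hpos, if_pos hpos, hq, hr, htI]
    -- LHS: turn pyRange into List.range n
    rw [PySem.List.pyRange_one]
    have hto : (index + 1 - 1).toNat = n := by omega
    rw [hto, List.countP_map]
    set P : Nat → Bool := fun v => decide (Char.ofNat (v + 97) ∈ skip.toList) with hP
    have hLcongr : (List.range n).countP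
        ((fun i => PySem.Chars.isIn [Char.ofNat (PySem.Int.mod ((m : Int) + i - 97) 26 + 97).toNat] skip.toList) ∘ (fun k : Nat => 1 + (k : Int)))
        = (List.range n).countP (fun k => P ((m + 8 + k) % 26)) := by
      apply List.countP_congr
      intro k _
      simp only [Function.comp]
      have hmod : PySem.Int.mod ((m : Int) + (1 + (k : Int)) - 97) 26 = (((m + 8 + k) % 26 : Nat) : Int) := by
        rw [PySem.Int.mod_eq_emod_of_pos (by norm_num)]
        omega
      rw [hmod]
      have htn : ((((m + 8 + k) % 26 : Nat) : Int) + 97).toNat = (m + 8 + k) % 26 + 97 := by omega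
      rw [htn]
      simp [PySem.Chars.isIn_iff_infix, List.singleton_infix_iff, hP]
    rw [hLcongr]
    -- RHS: set lengths to countPs
    have hSlen : ((Sskip skip).length : Int) = (((List.range 26).countP P : Nat) : Int) := by
      have := length_filter_eq_countP (Sskip skip) (Sskip_nodup skip) (Sskip_bounds skip) (fun _ => true)
      rw [List.filter_true] at this
      rw [this]
      congr 1
      apply List.countP_congr
      intro v hv
      have hvlt : v < 26 := List.mem_range.mp hv
      simp [mem_Sskip skip v hvlt, hP]
    have hWlen : (((Sskip skip).filter (fun j => PySem.Int.mod (j + 96 - ((m % 26 : Nat) : Int)) 26 < ((n % 26 : Nat) : Int))).length : Int)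
        = (((List.range 26).countP (fun v => P v && decide ((v + 26 - (m + 8) % 26) % 26 < n % 26)) : Nat) : Int) := by
      rw [length_filter_eq_countP (Sskip skip) (Sskip_nodup skip) (Sskip_bounds skip)]
      congr 1
      apply List.countP_congr
      intro v hv
      have hvlt : v < 26 := List.mem_range.mp hv
      have hmod2 : PySem.Int.mod ((v : Int) + 96 - ((m % 26 : Nat) : Int)) 26
          = (((v + 96 - m % 26) % 26 : Nat) : Int) := by
        rw [PySem.Int.mod_eq_emod_of_pos (by norm_num)]
        have h1 : m % 26 < 26 := by omega
        omega
      rw [hmod2]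
      have harith : ((v + 96 - m % 26) % 26 < n % 26) ↔ ((v + 26 - (m + 8) % 26) % 26 < n % 26) := by
        have h1 : m % 26 < 26 := by omega
        omega
      by_cases hc : Char.ofNat (v + 97) ∈ skip.toList <;>
        simp [hc, mem_Sskip skip v hvlt, hP] <;> omega
    rw [hWlen, hSlen, zero_add, core_count P (m + 8) n]
    push_cast
    ring
  · -- index ≤ 0 : empty range, zero table entry
    rw [if_neg hpos, if_neg hpos]
    rw [PySem.List.pyRange_one_eq_nil (by omega)]
    have hfil : ((Sskip skip).filter (fun j => PySem.Int.mod (j + 96 - PySem.Int.mod (c.toNat : Int) 26) 26 < 0)) = [] := by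
      rw [List.filter_eq_nil_iff]
      intro j _
      have := PySem.Int.mod_nonneg (j + 96 - PySem.Int.mod (c.toNat : Int) 26) (b := 26) (by norm_num)
      simp
      omega
    rw [hfil]
    simp

theorem glue (s skip : String) (index : Int) : solution s skip index = solution_alt s skip index := by
  simp only [solution, solution_alt]
  rw [PySem.List.foldl_append_singleton_eq_map]
  simp only [List.nil_append]
  congr 1
  apply List.map_congr_left
  intro c _
  rw [inner_count_eq]
  rfl

-- ===== VERDICT (by name: the statement is the Claim_ definition above) =====
theorem solution_spec : Claim_equal_solution := by
  intro s skip index _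
  unfold Spec_solution
  exact glue s skip index
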